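-- pv_equiv track=rewrite | github.com/Doduji/baekjoon | 프로그래머스/unrated/181837. 커피 심부름/커피 심부름.py | solution
-- ===== SOURCE A (Python) =====
-- def solution(order):
--     answer = 0
--
--     for i in range(0, len(order)) :
--         if "cafelatte" in order[i] :
--             answer+=5000
--         else :
--             answer+=4500
--
--
--     return answer
-- ===== SOURCE B (Python) =====
-- def solution(order):
--     n = len(order)
--     if n == 0:
--         return 0
--     if n == 1:
--         return 5000 if "cafelatte" in order[0] else 4500
--     m = n // 2
--     return solution(order[:m]) + solution(order[m:])
-- ===== Notes on version B (the rewrite author's own statement) =====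
-- stated objective: alternative
-- what changed: Replaces the linear branching accumulator loop with a divide-and-conquer recursion that splits the order list in half and sums the two subtotals, with single-element base cases.
import Mathlib
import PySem

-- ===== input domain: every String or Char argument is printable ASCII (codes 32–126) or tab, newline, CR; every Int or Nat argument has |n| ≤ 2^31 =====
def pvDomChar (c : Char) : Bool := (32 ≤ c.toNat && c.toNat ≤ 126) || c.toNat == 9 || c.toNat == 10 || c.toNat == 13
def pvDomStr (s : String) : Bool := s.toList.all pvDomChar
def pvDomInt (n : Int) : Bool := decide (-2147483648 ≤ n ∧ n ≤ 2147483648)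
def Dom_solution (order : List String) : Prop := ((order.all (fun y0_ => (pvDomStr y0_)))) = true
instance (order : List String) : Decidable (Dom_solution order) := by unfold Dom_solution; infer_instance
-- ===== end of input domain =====

-- B computes the same total by divide-and-conquer: split the list in half, recurse, add the subtotals.
-- ===== PORT A =====
def solution (order : List String) : Int :=
  (PySem.List.pyRange 0 (PySem.List.len order) 1).foldl
    (fun answer i =>
      if PySem.Str.isIn "cafelatte" (PySem.List.pyGetD order i "") then answer + 5000
      else answer + 4500) 0

-- ===== PORT B =====
def solution_alt (order : List String) : Int :=
  let n := order.length
  if n = 0 then 0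
  else if n = 1 then
    (if PySem.Str.isIn "cafelatte" (PySem.List.pyGetD order 0 "") then 5000 else 4500)
  else
    let m := n / 2
    solution_alt (PySem.List.slice order none (some (m : Int))) +
    solution_alt (PySem.List.slice order (some (m : Int)) none)
termination_by order.length
decreasing_by
  · rw [PySem.List.slice_to_natCast]
    simp only [List.length_take]
    omega
  · rw [PySem.List.slice_from_natCast]
    simp only [List.length_drop]
    omega

-- ===== PRECONDITION & SPEC =====
def Spec_solution (order : List String) (out : Int) : Prop := out = solution_alt order
instance (order : List String) (out : Int) : Decidable (Spec_solution order out) := by unfold Spec_solution; infer_instance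

-- ===== CLAIM (what is proved, stated in full; the proofs are below) =====
def Claim_equal_solution : Prop := ∀ (order : List String), Dom_solution order → Spec_solution order (solution order)

-- ===== LEMMAS AND PROOFS =====
-- closed form both ports are proved equal to
def pvTotal (order : List String) : Int :=
  4500 * (order.length : Int) + 500 * (order.countP (fun o => PySem.Str.isIn "cafelatte" o) : Int)

theorem pvTotal_append (xs ys : List String) :
    pvTotal (xs ++ ys) = pvTotal xs + pvTotal ys := by
  simp only [pvTotal, List.length_append, List.countP_append]
  push_cast; ring

theorem solution_eq_total (order : List String) : solution order = pvTotal order := by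
  unfold solution
  rw [PySem.List.foldl_pyRange_zero_pyGetD order ""
        (fun answer o => if PySem.Str.isIn "cafelatte" o then answer + 5000 else answer + 4500) 0]
  induction order using List.reverseRecOn with
  | nil => simp [pvTotal]
  | append_singleton xs x ih =>
    rw [List.foldl_append, ih, pvTotal_append]
    simp only [List.foldl_cons, List.foldl_nil, pvTotal, List.countP_cons, List.countP_nil,
      List.length_singleton]
    split_ifs <;> push_cast <;> ring

theorem solution_alt_eq_total_aux : ∀ (n : Nat) (order : List String),
    order.length = n → solution_alt order = pvTotal order := by
  intro n
  induction n using Nat.strong_induction_on with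
  | _ n ih =>
    intro order hlen
    rw [solution_alt]
    by_cases h0 : order.length = 0
    · simp [List.eq_nil_of_length_eq_zero h0, pvTotal]
    · by_cases h1 : order.length = 1
      · simp only [h1, if_true]
        match order, h1 with
        | [x], _ =>
          simp only [pvTotal, List.countP_cons, List.countP_nil, List.length_singleton,
            PySem.List.pyGetD, PySem.List.pyGet?, PySem.List.pyIdx?]
          norm_num
          split_ifs <;> push_cast
      · simp only [h0, h1, if_false]
        rw [PySem.List.slice_to_natCast, PySem.List.slice_from_natCast]
        rw [ih ((order.take (order.length / 2)).length) (by simp; omega) _ rfl,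
            ih ((order.drop (order.length / 2)).length) (by simp; omega) _ rfl]
        rw [← pvTotal_append, List.take_append_drop]

theorem solution_alt_eq_total (order : List String) : solution_alt order = pvTotal order :=
  solution_alt_eq_total_aux order.length order rfl

-- ===== VERDICT (by name: the statement is the Claim_ definition above) =====
theorem solution_spec : Claim_equal_solution := by
  intro order _
  show solution order = solution_alt order
  rw [solution_eq_total, solution_alt_eq_total]
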